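-- pv_equiv track=rewrite | github.com/movement-recognition/pouch-dataprepper | src/util.py | tag_list_to_struct
-- ===== SOURCE A (Python) =====
-- def tag_list_to_struct(tag_list):
--     struct = {
--         "veh_type": [],
--         "floor_type": [],
--         "movement_type": [],
--         "movement_direction": [],
--         "short_event": [],
--         "other": []
--     }
--     for t in tag_list:
--         if t[-4:] == "_veh":
--             struct["veh_type"].append(t.split("_veh")[0].strip())
--         elif t[-4:] == "_flo":
--             struct["floor_type"].append(t.split("_flo")[0].strip())
--         elif t[-4:] == "_mov":
--             struct["movement_type"].append(t.split("_mov")[0].strip())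
--         elif t[-4:] == "_dir":
--             struct["movement_direction"].append(t.split("_dir")[0].strip())
--         elif t[-4:] == "_evt":
--             struct["short_event"].append(t.split("_evt")[0].strip())
--         else:
--             struct["other"].append(t)
--     return struct
-- ===== SOURCE B (Python) =====
-- def tag_list_to_struct(tag_list):
--     buckets = [("veh_type", "_veh"), ("floor_type", "_flo"), ("movement_type", "_mov"),
--                ("movement_direction", "_dir"), ("short_event", "_evt")]
--     struct = {name: [t.split(suf)[0].strip() for t in tag_list if t[-4:] == suf]
--               for name, suf in buckets}
--     struct["other"] = [t for t in tag_list
--                        if t[-4:] not in ("_veh", "_flo", "_mov", "_dir", "_evt")]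
--     return struct
-- ===== Notes on version B (the rewrite author's own statement) =====
-- stated objective: idiomatic
-- what changed: Replaces the single accumulation loop with an if/elif chain mutating a pre-built dict by a dict comprehension over a (bucket, suffix) table that builds each bucket with its own filter+map pass, plus one filter for 'other'.
import Mathlib
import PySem

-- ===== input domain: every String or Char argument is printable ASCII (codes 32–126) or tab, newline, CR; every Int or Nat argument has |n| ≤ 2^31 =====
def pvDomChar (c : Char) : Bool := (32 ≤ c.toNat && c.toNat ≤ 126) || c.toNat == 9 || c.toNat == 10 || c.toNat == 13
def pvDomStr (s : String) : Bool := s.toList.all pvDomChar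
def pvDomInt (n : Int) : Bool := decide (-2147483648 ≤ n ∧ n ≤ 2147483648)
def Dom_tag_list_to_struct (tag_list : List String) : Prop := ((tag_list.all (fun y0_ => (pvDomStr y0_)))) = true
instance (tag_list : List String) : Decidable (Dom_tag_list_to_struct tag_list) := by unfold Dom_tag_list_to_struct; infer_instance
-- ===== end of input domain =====

-- B replaces A's single if/elif accumulation loop by a (bucket, suffix) table with one filter+map pass per bucket (idiomatic; same cost).

-- shared helpers for Python idioms used by both sources: t[-4:] and t.split(sep)[0].strip()
def pySuf4 (t : String) : String := PySem.Str.slice t (some (-4)) none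
def pySplitHead (t sep : String) : String := PySem.Str.strip (((PySem.Str.split? t sep).getD []).headD "")

-- ===== PORT A =====
def tlsStep (d : PySem.Dict String (List String)) (t : String) : PySem.Dict String (List String) :=
  if pySuf4 t == "_veh" then d.modify "veh_type" [] (· ++ [pySplitHead t "_veh"])
  else if pySuf4 t == "_flo" then d.modify "floor_type" [] (· ++ [pySplitHead t "_flo"])
  else if pySuf4 t == "_mov" then d.modify "movement_type" [] (· ++ [pySplitHead t "_mov"])
  else if pySuf4 t == "_dir" then d.modify "movement_direction" [] (· ++ [pySplitHead t "_dir"])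
  else if pySuf4 t == "_evt" then d.modify "short_event" [] (· ++ [pySplitHead t "_evt"])
  else d.modify "other" [] (· ++ [t])

def tag_list_to_struct (tag_list : List String) : List (String × List String) :=
  (tag_list.foldl tlsStep (PySem.Dict.ofList
    [("veh_type", []), ("floor_type", []), ("movement_type", []),
     ("movement_direction", []), ("short_event", []), ("other", [])])).items

-- ===== PORT B =====
def tlsBucket (tag_list : List String) (suf : String) : List String :=
  (tag_list.filter (fun t => pySuf4 t == suf)).map (fun t => pySplitHead t suf)

def tlsOther (tag_list : List String) : List String :=
  tag_list.filter (fun t => !(["_veh", "_flo", "_mov", "_dir", "_evt"].contains (pySuf4 t)))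

def tag_list_to_struct_alt (tag_list : List String) : List (String × List String) :=
  ([("veh_type", "_veh"), ("floor_type", "_flo"), ("movement_type", "_mov"),
    ("movement_direction", "_dir"), ("short_event", "_evt")].map
      (fun p => (p.1, tlsBucket tag_list p.2)))
  ++ [("other", tlsOther tag_list)]

-- ===== PRECONDITION & SPEC =====
def Spec_tag_list_to_struct (tag_list : List String) (out : List (String × List String)) : Prop := out = tag_list_to_struct_alt tag_list
instance (tag_list : List String) (out : List (String × List String)) : Decidable (Spec_tag_list_to_struct tag_list out) := by unfold Spec_tag_list_to_struct; infer_instance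

-- ===== CLAIM (what is proved, stated in full; the proofs are below) =====
def Claim_equal_tag_list_to_struct : Prop := ∀ (tag_list : List String), Dom_tag_list_to_struct tag_list → Spec_tag_list_to_struct tag_list (tag_list_to_struct tag_list)

-- ===== LEMMAS AND PROOFS =====

-- invariant of A's loop: folding tlsStep over a six-key dict appends each bucket's filtered suffix-matches
theorem tls_fold_items (l : List String) (v1 v2 v3 v4 v5 v6 : List String) :
    (l.foldl tlsStep (PySem.Dict.mk
      [("veh_type", v1), ("floor_type", v2), ("movement_type", v3),
       ("movement_direction", v4), ("short_event", v5), ("other", v6)])).items =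
    [("veh_type", v1 ++ tlsBucket l "_veh"), ("floor_type", v2 ++ tlsBucket l "_flo"),
     ("movement_type", v3 ++ tlsBucket l "_mov"), ("movement_direction", v4 ++ tlsBucket l "_dir"),
     ("short_event", v5 ++ tlsBucket l "_evt"), ("other", v6 ++ tlsOther l)] := by
  induction l generalizing v1 v2 v3 v4 v5 v6 with
  | nil => simp [tlsBucket, tlsOther]
  | cons t l ih =>
    simp only [List.foldl_cons, tlsStep]
    by_cases h1 : pySuf4 t == "_veh"
    · simp [h1, PySem.Dict.modify, PySem.Dict.insert, PySem.Dict.getD, PySem.Dict.get?,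
        PySem.Dict.contains, ih, tlsBucket, tlsOther, eq_of_beq h1]
    · by_cases h2 : pySuf4 t == "_flo"
      · simp [h1, h2, PySem.Dict.modify, PySem.Dict.insert, PySem.Dict.getD, PySem.Dict.get?,
          PySem.Dict.contains, ih, tlsBucket, tlsOther, eq_of_beq h2]
      · by_cases h3 : pySuf4 t == "_mov"
        · simp [h1, h2, h3, PySem.Dict.modify, PySem.Dict.insert, PySem.Dict.getD, PySem.Dict.get?,
            PySem.Dict.contains, ih, tlsBucket, tlsOther, eq_of_beq h3]
        · by_cases h4 : pySuf4 t == "_dir"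
          · simp [h1, h2, h3, h4, PySem.Dict.modify, PySem.Dict.insert, PySem.Dict.getD, PySem.Dict.get?,
              PySem.Dict.contains, ih, tlsBucket, tlsOther, eq_of_beq h4]
          · by_cases h5 : pySuf4 t == "_evt"
            · simp [h1, h2, h3, h4, h5, PySem.Dict.modify, PySem.Dict.insert, PySem.Dict.getD, PySem.Dict.get?,
                PySem.Dict.contains, ih, tlsBucket, tlsOther, eq_of_beq h5]
            · simp [h1, h2, h3, h4, h5, PySem.Dict.modify, PySem.Dict.insert, PySem.Dict.getD, PySem.Dict.get?,
                PySem.Dict.contains, ih, tlsBucket, tlsOther]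
              rw [List.filter_cons_of_pos (by simp_all)]

-- ===== VERDICT (by name: the statement is the Claim_ definition above) =====
theorem tag_list_to_struct_spec : Claim_equal_tag_list_to_struct := by
  intro tag_list _
  unfold Spec_tag_list_to_struct tag_list_to_struct tag_list_to_struct_alt
  have h0 : PySem.Dict.ofList
      ([("veh_type", ([] : List String)), ("floor_type", []), ("movement_type", []),
        ("movement_direction", []), ("short_event", []), ("other", [])]) =
      PySem.Dict.mk
      [("veh_type", []), ("floor_type", []), ("movement_type", []),
       ("movement_direction", []), ("short_event", []), ("other", [])] := by decide
  rw [h0, tls_fold_items]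
  simp
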